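-- pv_equiv track=rewrite | github.com/apratimkc/bringing-a-gun-to-a-trainer-fight | solution-bringing-a-gun-to-a-trainer-fight.py | get_mirror_coordinates
-- ===== SOURCE A (Python) =====
-- def get_mirror_coordinates(size,pos,rel_cg,layer_count):
--     [w,h] = size
--     (px,py) = pos
--
--     dxR = (w-px)*2
--     dxL = px*2
--     x= [px-rel_cg[0]]*(layer_count*2+1)
--     for i in range(layer_count+1,layer_count*2+1):
--         x[i] = x[i-1]+dxR if (i-layer_count-1)%2==0 else x[i-1]+dxL
--     for i in range(layer_count-1,-1,-1):
--         x[i] = x[i+1]-dxL if (layer_count-1-i)%2==0 else x[i+1]-dxR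
--
--     dyU = (h-py)*2 #275-100=175*2=350
--     dyD = py*2
--     y= [py-rel_cg[1]]*(layer_count*2+1)
--     for i in range(layer_count+1,layer_count*2+1):
--         y[i] = y[i-1]+dyU if (i-layer_count-1)%2==0 else y[i-1]+dyD
--     for i in range(layer_count-1,-1,-1):
--         y[i] = y[i+1]-dyD if (layer_count-1-i)%2==0 else y[i+1]-dyU
--
--     return x,y
-- ===== SOURCE B (Python) =====
-- def get_mirror_coordinates(size, pos, rel_cg, layer_count):
--     [w, h] = size
--     (px, py) = pos
--     n = layer_count
--
--     def axis(base, dp, dm):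
--         # offset of index i from the base: k>0 steps alternate dp,dm going up
--         # (dp first), and dm,dp going down (dm first), so ceil/floor of |k|/2
--         # count each delta; every entry is computed independently.
--         def off(k):
--             if k >= 0:
--                 return ((k + 1) // 2) * dp + (k // 2) * dm
--             j = -k
--             return -(((j + 1) // 2) * dm + (j // 2) * dp)
--         return [base + off(i - n) for i in range(2 * n + 1)]
--
--     x = axis(px - rel_cg[0], (w - px) * 2, px * 2)
--     y = axis(py - rel_cg[1], (h - py) * 2, py * 2)
--     return x, y
-- ===== Notes on version B (the rewrite author's own statement) =====
-- stated objective: alternative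
-- what changed: Replaces the two cumulative neighbour-dependent fill loops per axis with one comprehension that computes each entry independently from a closed-form ceil/floor count of R- and L-bounces.
import Mathlib
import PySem

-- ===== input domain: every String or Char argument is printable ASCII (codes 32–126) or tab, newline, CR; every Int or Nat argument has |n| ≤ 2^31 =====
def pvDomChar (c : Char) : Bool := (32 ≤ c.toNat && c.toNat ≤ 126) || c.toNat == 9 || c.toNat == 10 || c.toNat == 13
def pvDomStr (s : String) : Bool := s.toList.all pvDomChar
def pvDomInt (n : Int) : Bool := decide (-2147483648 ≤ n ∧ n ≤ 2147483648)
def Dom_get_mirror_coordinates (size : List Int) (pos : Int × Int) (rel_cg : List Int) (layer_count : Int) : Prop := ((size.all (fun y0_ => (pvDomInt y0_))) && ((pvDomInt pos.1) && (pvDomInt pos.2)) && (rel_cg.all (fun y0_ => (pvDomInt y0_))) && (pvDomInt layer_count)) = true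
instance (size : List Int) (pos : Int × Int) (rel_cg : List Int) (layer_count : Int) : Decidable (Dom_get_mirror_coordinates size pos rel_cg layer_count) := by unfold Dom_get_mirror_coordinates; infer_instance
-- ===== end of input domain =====

-- B replaces A's cumulative neighbour-dependent fill loops by an independent
-- closed-form ceil/floor bounce count per index (objective: alternative).

-- ===== PORT A =====
-- xs[i] for a list index; inside Pre_ every executed access is in range, so the default is never used
def pvGetZ (xs : List Int) (i : Int) : Int := PySem.List.pyGetD xs i 0

def get_mirror_coordinates (size : List Int) (pos : Int × Int) (rel_cg : List Int) (layer_count : Int) : List Int × List Int :=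
  -- [w,h] = size (Pre_ demands size.length = 2); rel_cg[0]/rel_cg[1] (Pre_ demands 2 ≤ rel_cg.length)
  let w := PySem.List.pyGetD size 0 0
  let h := PySem.List.pyGetD size 1 0
  let px := pos.1
  let py := pos.2
  let dxR := (w - px) * 2
  let dxL := px * 2
  let x0 := List.replicate (layer_count * 2 + 1).toNat (px - PySem.List.pyGetD rel_cg 0 0)
  let x1 := (PySem.List.pyRange (layer_count + 1) (layer_count * 2 + 1) 1).foldl
      (fun xs i => PySem.List.pySetD xs i
        (if PySem.Int.mod (i - layer_count - 1) 2 = 0 then pvGetZ xs (i - 1) + dxR else pvGetZ xs (i - 1) + dxL)) x0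
  let x2 := (PySem.List.pyRange (layer_count - 1) (-1) (-1)).foldl
      (fun xs i => PySem.List.pySetD xs i
        (if PySem.Int.mod (layer_count - 1 - i) 2 = 0 then pvGetZ xs (i + 1) - dxL else pvGetZ xs (i + 1) - dxR)) x1
  let dyU := (h - py) * 2
  let dyD := py * 2
  let y0 := List.replicate (layer_count * 2 + 1).toNat (py - PySem.List.pyGetD rel_cg 1 0)
  let y1 := (PySem.List.pyRange (layer_count + 1) (layer_count * 2 + 1) 1).foldl
      (fun xs i => PySem.List.pySetD xs i
        (if PySem.Int.mod (i - layer_count - 1) 2 = 0 then pvGetZ xs (i - 1) + dyU else pvGetZ xs (i - 1) + dyD)) y0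
  let y2 := (PySem.List.pyRange (layer_count - 1) (-1) (-1)).foldl
      (fun xs i => PySem.List.pySetD xs i
        (if PySem.Int.mod (layer_count - 1 - i) 2 = 0 then pvGetZ xs (i + 1) - dyD else pvGetZ xs (i + 1) - dyU)) y1
  (x2, y2)

-- ===== PORT B =====
-- off(k) of Source B: closed-form offset of the entry k places above (k>0) / below (k<0) the centre
def pvOff (dp dm k : Int) : Int :=
  if 0 ≤ k then PySem.Int.floordiv (k + 1) 2 * dp + PySem.Int.floordiv k 2 * dm
  else -(PySem.Int.floordiv (-k + 1) 2 * dm + PySem.Int.floordiv (-k) 2 * dp)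

-- axis(base, dp, dm) of Source B
def pvAxisB (n base dp dm : Int) : List Int :=
  (PySem.List.pyRange 0 (2 * n + 1) 1).map (fun i => base + pvOff dp dm (i - n))

def get_mirror_coordinates_alt (size : List Int) (pos : Int × Int) (rel_cg : List Int) (layer_count : Int) : List Int × List Int :=
  let w := PySem.List.pyGetD size 0 0
  let h := PySem.List.pyGetD size 1 0
  let px := pos.1
  let py := pos.2
  (pvAxisB layer_count (px - PySem.List.pyGetD rel_cg 0 0) ((w - px) * 2) (px * 2),
   pvAxisB layer_count (py - PySem.List.pyGetD rel_cg 1 0) ((h - py) * 2) (py * 2))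

-- ===== PRECONDITION & SPEC =====
-- Exactly the inputs where Python A returns: [w,h] = size needs size of length 2,
-- and rel_cg[0], rel_cg[1] need rel_cg of length ≥ 2 (else ValueError/IndexError).
def Pre_get_mirror_coordinates (size : List Int) (pos : Int × Int) (rel_cg : List Int) (layer_count : Int) : Prop :=
  size.length = 2 ∧ 2 ≤ rel_cg.length
instance (size : List Int) (pos : Int × Int) (rel_cg : List Int) (layer_count : Int) : Decidable (Pre_get_mirror_coordinates size pos rel_cg layer_count) := by unfold Pre_get_mirror_coordinates; infer_instance

def pvWitness_get_mirror_coordinates : List Int × (Int × Int) × List Int × Int := ([3, 2], (1, 1), [0, 0], 2)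

def Spec_get_mirror_coordinates (size : List Int) (pos : Int × Int) (rel_cg : List Int) (layer_count : Int) (out : List Int × List Int) : Prop := out = get_mirror_coordinates_alt size pos rel_cg layer_count
instance (size : List Int) (pos : Int × Int) (rel_cg : List Int) (layer_count : Int) (out : List Int × List Int) : Decidable (Spec_get_mirror_coordinates size pos rel_cg layer_count out) := by unfold Spec_get_mirror_coordinates; infer_instance

-- ===== CLAIM (what is proved, stated in full; the proofs are below) =====
def Claim_equal_get_mirror_coordinates : Prop := ∀ (size : List Int) (pos : Int × Int) (rel_cg : List Int) (layer_count : Int), Dom_get_mirror_coordinates size pos rel_cg layer_count → Pre_get_mirror_coordinates size pos rel_cg layer_count → Spec_get_mirror_coordinates size pos rel_cg layer_count (get_mirror_coordinates size pos rel_cg layer_count)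

-- ===== LEMMAS AND PROOFS =====

-- closed-form partial sums of the alternating deltas (Nat-indexed, for the inductions)
def pvUpOff (dP dM : Int) (k : Nat) : Int := (((k + 1) / 2 : Nat) : Int) * dP + ((k / 2 : Nat) : Int) * dM
def pvDnOff (dP dM : Int) (k : Nat) : Int := (((k + 1) / 2 : Nat) : Int) * dM + ((k / 2 : Nat) : Int) * dP
def pvF (n : Nat) (base dP dM : Int) (j : Nat) : Int :=
  if j < n then base - pvDnOff dP dM (n - j) else base + pvUpOff dP dM (j - n)

lemma pvUpOff_zero (dP dM : Int) : pvUpOff dP dM 0 = 0 := by simp [pvUpOff]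
lemma pvDnOff_zero (dP dM : Int) : pvDnOff dP dM 0 = 0 := by simp [pvDnOff]

lemma pvUpOff_succ (dP dM : Int) (m : Nat) :
    pvUpOff dP dM (m + 1) = pvUpOff dP dM m + (if m % 2 = 0 then dP else dM) := by
  rcases Nat.even_or_odd m with ⟨t, ht⟩ | ⟨t, ht⟩ <;> subst ht
  · have h1 : (t + t + 1 + 1) / 2 = t + 1 := by omega
    have h2 : (t + t + 1) / 2 = t := by omega
    have h3 : (t + t) / 2 = t := by omega
    have h4 : (t + t) % 2 = 0 := by omega
    simp [pvUpOff, h1, h2, h3, h4]; ring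
  · have h1 : (2 * t + 1 + 1 + 1) / 2 = t + 1 := by omega
    have h2 : (2 * t + 1 + 1) / 2 = t + 1 := by omega
    have h3 : (2 * t + 1) / 2 = t := by omega
    have h4 : (2 * t + 1) % 2 = 1 := by omega
    simp [pvUpOff, h1, h2, h3, h4]; ring

lemma pvDnOff_succ (dP dM : Int) (m : Nat) :
    pvDnOff dP dM (m + 1) = pvDnOff dP dM m + (if m % 2 = 0 then dM else dP) := by
  rcases Nat.even_or_odd m with ⟨t, ht⟩ | ⟨t, ht⟩ <;> subst ht
  · have h1 : (t + t + 1 + 1) / 2 = t + 1 := by omega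
    have h2 : (t + t + 1) / 2 = t := by omega
    have h3 : (t + t) / 2 = t := by omega
    have h4 : (t + t) % 2 = 0 := by omega
    simp [pvDnOff, h1, h2, h3, h4]; ring
  · have h1 : (2 * t + 1 + 1 + 1) / 2 = t + 1 := by omega
    have h2 : (2 * t + 1 + 1) / 2 = t + 1 := by omega
    have h3 : (2 * t + 1) / 2 = t := by omega
    have h4 : (2 * t + 1) % 2 = 1 := by omega
    simp [pvDnOff, h1, h2, h3, h4]; ring

-- setting one entry of a range-map is a range-map of the pointwise-updated function
lemma pvSetMapRange (N p : Nat) (v : Int) (f g : Nat → Int) (_hp : p < N)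
    (hv : v = g p) (hfg : ∀ j, j ≠ p → f j = g j) :
    ((List.range N).map f).set p v = (List.range N).map g := by
  apply List.ext_getElem (by simp)
  intro i h1 h2
  simp only [List.getElem_set, List.getElem_map, List.getElem_range]
  by_cases hip : p = i
  · rw [if_pos hip, hv, hip]
  · rw [if_neg hip]
    exact hfg i (fun h => hip h.symm)

lemma pvReplicate_eq_map (N : Nat) (c : Int) :
    List.replicate N c = (List.range N).map (fun _ => c) := by
  simp [List.map_const']

lemma pvGetZ_map_range (N : Nat) (f : Nat → Int) (j : Nat) (hj : j < N) :
    pvGetZ ((List.range N).map f) (j : Int) = f j := by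
  simp [pvGetZ, List.getD_eq_getElem?_getD, hj]

lemma pvModTwoCast (m : Nat) : PySem.Int.mod ((m : Nat) : Int) 2 = ((m % 2 : Nat) : Int) := by
  exact_mod_cast PySem.Int.mod_natCast m 2

lemma pvFloorTwoCast (m : Nat) : PySem.Int.floordiv ((m : Nat) : Int) 2 = ((m / 2 : Nat) : Int) := by
  exact_mod_cast PySem.Int.floordiv_natCast m 2

lemma pvUpFold (n : Nat) (base dP dM : Int) (m : Nat) (hm : m ≤ n) :
    (PySem.List.pyRange ((n : Int) + 1) ((n : Int) + 1 + m) 1).foldl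
      (fun xs i => PySem.List.pySetD xs i
        (if PySem.Int.mod (i - n - 1) 2 = 0 then pvGetZ xs (i - 1) + dP else pvGetZ xs (i - 1) + dM))
      (List.replicate (2 * n + 1) base)
    = (List.range (2 * n + 1)).map
        (fun j => if j ≤ n + m then base + pvUpOff dP dM (j - n) else base) := by
  induction m with
  | zero =>
      rw [PySem.List.pyRange_one_eq_nil (by omega)]
      rw [List.foldl_nil, pvReplicate_eq_map]
      apply List.map_congr_left
      intro j hj
      by_cases h : j ≤ n + 0
      · rw [if_pos h, (by omega : j - n = 0), pvUpOff_zero, add_zero]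
      · rw [if_neg h]
  | succ m ih =>
      have hcast : (n : Int) + 1 + ((m + 1 : Nat) : Int) = ((n : Int) + 1 + m) + 1 := by push_cast; ring
      rw [hcast, PySem.List.pyRange_one_succ_right (by omega), List.foldl_append, ih (by omega)]
      rw [List.foldl_cons, List.foldl_nil]
      have hidx : (n : Int) + 1 + (m : Int) - 1 = ((n + m : Nat) : Int) := by push_cast; ring
      have hcond : (n : Int) + 1 + (m : Int) - (n : Int) - 1 = ((m : Nat) : Int) := by ring
      have hget : pvGetZ ((List.range (2 * n + 1)).map
          (fun j => if j ≤ n + m then base + pvUpOff dP dM (j - n) else base)) ((n + m : Nat) : Int)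
          = base + pvUpOff dP dM m := by
        rw [pvGetZ_map_range _ _ _ (by omega)]
        rw [if_pos (by omega : n + m ≤ n + m), (by omega : n + m - n = m)]
      rw [hidx, hcond, hget, pvModTwoCast]
      have hseti : (n : Int) + 1 + (m : Int) = ((n + 1 + m : Nat) : Int) := by push_cast; ring
      rw [hseti, PySem.List.pySetD_natCast]
      apply pvSetMapRange _ _ _ _ _ (by omega)
      · rw [if_pos (by omega : n + 1 + m ≤ n + (m + 1)), (by omega : n + 1 + m - n = m + 1), pvUpOff_succ]
        by_cases hpar : m % 2 = 0
        · rw [if_pos hpar, if_pos (by exact_mod_cast congrArg (Nat.cast : Nat → Int) hpar), add_assoc]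
        · rw [if_neg hpar, if_neg (by omega : ¬ ((m % 2 : Nat) : Int) = 0), add_assoc]
      · intro j hj
        by_cases h1 : j ≤ n + m
        · rw [if_pos h1, if_pos (by omega : j ≤ n + (m + 1))]
        · rw [if_neg h1, if_neg (by omega : ¬ j ≤ n + (m + 1))]

lemma pvDnFold (n : Nat) (base dP dM : Int) (m : Nat) (hm : m ≤ n) :
    ((List.range m).map (fun k : Nat => (n : Int) - 1 - (k : Int))).foldl
      (fun xs i => PySem.List.pySetD xs i
        (if PySem.Int.mod ((n : Int) - 1 - i) 2 = 0 then pvGetZ xs (i + 1) - dM else pvGetZ xs (i + 1) - dP))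
      ((List.range (2 * n + 1)).map (fun j => base + pvUpOff dP dM (j - n)))
    = (List.range (2 * n + 1)).map
        (fun j => if j < n - m then base else pvF n base dP dM j) := by
  induction m with
  | zero =>
      rw [List.range_zero, List.map_nil, List.foldl_nil]
      apply List.map_congr_left
      intro j hj
      by_cases h : j < n - 0
      · rw [if_pos h, (by omega : j - n = 0), pvUpOff_zero, add_zero]
      · rw [if_neg h, pvF, if_neg (by omega : ¬ j < n)]
  | succ m ih =>
      have hsplit : (List.range (m + 1)).map (fun k : Nat => (n : Int) - 1 - (k : Int))
          = (List.range m).map (fun k : Nat => (n : Int) - 1 - (k : Int)) ++ [(n : Int) - 1 - (m : Int)] := by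
        rw [List.range_succ, List.map_append, List.map_singleton]
      rw [hsplit, List.foldl_append, ih (by omega)]
      rw [List.foldl_cons, List.foldl_nil]
      have hcond : (n : Int) - 1 - ((n : Int) - 1 - (m : Int)) = ((m : Nat) : Int) := by ring
      have hidx : (n : Int) - 1 - (m : Int) + 1 = ((n - m : Nat) : Int) := by
        rw [Nat.cast_sub (by omega : m ≤ n)]; ring
      have hget : pvGetZ ((List.range (2 * n + 1)).map
          (fun j => if j < n - m then base else pvF n base dP dM j)) ((n - m : Nat) : Int)
          = base - pvDnOff dP dM m := by
        rw [pvGetZ_map_range _ _ _ (by omega)]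
        rw [if_neg (by omega : ¬ (n - m < n - m))]
        rcases Nat.eq_zero_or_pos m with hm0 | hm0
        · subst hm0
          rw [pvF, if_neg (by omega : ¬ (n - 0 < n)), (by omega : n - 0 - n = 0),
            pvUpOff_zero, pvDnOff_zero, add_zero, sub_zero]
        · rw [pvF, if_pos (by omega : n - m < n), (by omega : n - (n - m) = m)]
      rw [hcond, hidx, hget, pvModTwoCast]
      have hseti : (n : Int) - 1 - (m : Int) = ((n - 1 - m : Nat) : Int) := by
        rw [Nat.cast_sub (by omega : m ≤ n - 1), Nat.cast_sub (by omega : 1 ≤ n)]; ring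
      rw [hseti, PySem.List.pySetD_natCast]
      apply pvSetMapRange _ _ _ _ _ (by omega)
      · rw [if_neg (by omega : ¬ (n - 1 - m < n - (m + 1))), pvF,
          if_pos (by omega : n - 1 - m < n), (by omega : n - (n - 1 - m) = m + 1), pvDnOff_succ]
        by_cases hpar : m % 2 = 0
        · rw [if_pos hpar, if_pos (by exact_mod_cast congrArg (Nat.cast : Nat → Int) hpar)]; ring
        · rw [if_neg hpar, if_neg (by omega : ¬ ((m % 2 : Nat) : Int) = 0)]; ring
      · intro j hj
        by_cases h1 : j < n - m
        · rw [if_pos h1, if_pos (by omega : j < n - (m + 1))]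
        · rw [if_neg h1, if_neg (by omega : ¬ j < n - (m + 1))]

-- B's closed form at a Nat index agrees with pvF
lemma pvOff_cast (n j : Nat) (base dP dM : Int) :
    base + pvOff dP dM ((j : Int) - (n : Int)) = pvF n base dP dM j := by
  by_cases h : n ≤ j
  · have h0 : (0 : Int) ≤ (j : Int) - n := by omega
    have hc : (j : Int) - (n : Int) = ((j - n : Nat) : Int) := by rw [Nat.cast_sub h]
    rw [pvF, if_neg (by omega : ¬ j < n), pvOff, if_pos h0, hc,
      (by push_cast; ring : ((j - n : Nat) : Int) + 1 = (((j - n) + 1 : Nat) : Int)),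
      pvFloorTwoCast, pvFloorTwoCast, pvUpOff]
  · have h0 : ¬ (0 : Int) ≤ (j : Int) - n := by omega
    have hc : -((j : Int) - (n : Int)) = ((n - j : Nat) : Int) := by rw [Nat.cast_sub (by omega : j ≤ n)]; ring
    rw [pvF, if_pos (by omega : j < n), pvOff, if_neg h0, hc,
      (by push_cast; ring : ((n - j : Nat) : Int) + 1 = (((n - j) + 1 : Nat) : Int)),
      pvFloorTwoCast, pvFloorTwoCast, pvDnOff]
    ring

-- one axis of A (the two fill loops over the replicated base list) equals B's axis
lemma pvAxis_eq (L base dP dM : Int) :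
    (PySem.List.pyRange (L - 1) (-1) (-1)).foldl
      (fun xs i => PySem.List.pySetD xs i
        (if PySem.Int.mod (L - 1 - i) 2 = 0 then pvGetZ xs (i + 1) - dM else pvGetZ xs (i + 1) - dP))
      ((PySem.List.pyRange (L + 1) (L * 2 + 1) 1).foldl
        (fun xs i => PySem.List.pySetD xs i
          (if PySem.Int.mod (i - L - 1) 2 = 0 then pvGetZ xs (i - 1) + dP else pvGetZ xs (i - 1) + dM))
        (List.replicate (L * 2 + 1).toNat base))
    = pvAxisB L base dP dM := by
  rcases lt_or_ge L 0 with hL | hL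
  · rw [PySem.List.pyRange_one_eq_nil (by omega), PySem.List.pyRange_neg_one_eq_nil (by omega)]
    have h0 : (L * 2 + 1).toNat = 0 := by omega
    rw [pvAxisB, PySem.List.pyRange_one_eq_nil (by omega)]
    simp [h0]
  · obtain ⟨n, rfl⟩ := Int.eq_ofNat_of_zero_le hL
    have hrep : ((n : Int) * 2 + 1).toNat = 2 * n + 1 := by omega
    have hub : (n : Int) * 2 + 1 = (n : Int) + 1 + (n : Nat) := by ring
    rw [hrep, hub, pvUpFold n base dP dM n le_rfl]
    have hupfull : (List.range (2 * n + 1)).map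
        (fun j => if j ≤ n + n then base + pvUpOff dP dM (j - n) else base)
        = (List.range (2 * n + 1)).map (fun j => base + pvUpOff dP dM (j - n)) := by
      apply List.map_congr_left
      intro j hj
      rw [if_pos (by simp at hj; omega : j ≤ n + n)]
    rw [hupfull]
    have hdr : PySem.List.pyRange ((n : Int) - 1) (-1) (-1)
        = (List.range n).map (fun k : Nat => (n : Int) - 1 - (k : Int)) := by
      rw [PySem.List.pyRange_neg_one, (by omega : ((n : Int) - 1 - (-1)).toNat = n)]
    rw [hdr, pvDnFold n base dP dM n le_rfl]
    rw [pvAxisB]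
    have hb : (2 : Int) * (n : Int) + 1 = ((2 * n + 1 : Nat) : Int) := by push_cast; ring
    rw [hb, PySem.List.pyRange_zero_natCast, List.map_map]
    apply List.map_congr_left
    intro j hj
    rw [if_neg (by omega : ¬ j < n - n)]
    exact (pvOff_cast n j base dP dM).symm

-- ===== VERDICT (by name: the statement is the Claim_ definition above) =====
theorem get_mirror_coordinates_spec : Claim_equal_get_mirror_coordinates := by
  intro size pos rel_cg layer_count _ _
  show _ = _
  unfold get_mirror_coordinates get_mirror_coordinates_alt
  exact congrArg₂ Prod.mk (pvAxis_eq _ _ _ _) (pvAxis_eq _ _ _ _)
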